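-- pv_equiv track=rewrite | github.com/bhakti0302/RepoMind | mergeCodeAgent/llm_node.py | _split_instructions
-- ===== SOURCE A (Python) =====
-- from typing import Dict, List, Any, Optional
--
-- def _split_instructions(instructions: str) -> List[str]:
--     """
--     Split instructions into logical blocks for processing.
--     This method is more flexible to handle different instruction formats.
--
--     Args:
--         instructions: The full instructions text
--
--     Returns:
--         List of instruction blocks
--     """
--     # More flexible approach to split instructions
--     blocks = []
--     current_block = []
--
--     # Split by lines first
--     lines = instructions.split('\n')
--
--     # Common action verbs that might start a new instruction
--     action_verbs = [
--         "create", "add", "make", "generate",  # Creation verbs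
--         "modify", "update", "change", "edit", "alter",  # Modification verbs
--         "delete", "remove", "erase", "eliminate"  # Deletion verbs
--     ]
--
--     # File-related keywords that might indicate a file operation
--     file_keywords = ["file", "directory", "folder", "module", "class", "script"]
--
--     for line in lines:
--         line_lower = line.strip().lower()
--
--         # Check if this line likely starts a new instruction
--         is_new_instruction = False
--
--         # Check for action verbs followed by file keywords
--         for verb in action_verbs:
--             for keyword in file_keywords:
--                 if line_lower.startswith(verb) and keyword in line_lower:
--                     is_new_instruction = True
--                     break
--             if is_new_instruction:
--                 break
--
--         # If this looks like a new instruction and we already have content,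
--         # save the current block and start a new one
--         if is_new_instruction and current_block:
--             blocks.append('\n'.join(current_block))
--             current_block = [line]
--         else:
--             current_block.append(line)
--
--     # Add the last block if it's not empty
--     if current_block:
--         blocks.append('\n'.join(current_block))
--
--     # If we couldn't split into multiple blocks, try a simpler approach
--     if len(blocks) <= 1 and len(instructions.strip()) > 0:
--         # Try splitting by double newlines (paragraphs)
--         paragraph_blocks = instructions.split('\n\n')
--         if len(paragraph_blocks) > 1:
--             return [block.strip() for block in paragraph_blocks if block.strip()]
--
--     return blocks
-- ===== SOURCE B (Python) =====
-- from typing import List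
--
-- _ACTION_VERBS = [
--     "create", "add", "make", "generate",
--     "modify", "update", "change", "edit", "alter",
--     "delete", "remove", "erase", "eliminate"
-- ]
--
-- _FILE_KEYWORDS = ["file", "directory", "folder", "module", "class", "script"]
--
--
-- def _is_boundary(line: str) -> bool:
--     """A line that starts a new instruction: begins with an action verb and
--     mentions a file keyword."""
--     ll = line.strip().lower()
--     return any(ll.startswith(v) for v in _ACTION_VERBS) and \
--         any(k in ll for k in _FILE_KEYWORDS)
--
--
-- def _split_instructions(instructions: str) -> List[str]:
--     lines = instructions.split('\n')
--     n = len(lines)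
--     # Span decomposition: each block is one line followed by the run of
--     # non-boundary lines after it (line 0 always opens the first block).
--     blocks = []
--     i = 0
--     while i < n:
--         j = i + 1
--         while j < n and not _is_boundary(lines[j]):
--             j += 1
--         blocks.append('\n'.join(lines[i:j]))
--         i = j
--     # Fallback: paragraph split when no boundary was found.
--     if len(blocks) <= 1 and len(instructions.strip()) > 0:
--         paragraph_blocks = instructions.split('\n\n')
--         if len(paragraph_blocks) > 1:
--             return [block.strip() for block in paragraph_blocks if block.strip()]
--     return blocks
-- ===== Notes on version B (the rewrite author's own statement) =====
-- stated objective: alternative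
-- what changed: Replaces A's single-pass accumulator loop (current_block with flush-on-boundary, plus a nested verb*keyword double loop with breaks) by a span decomposition: an outer loop that, for each block, scans forward to the next boundary line (factored any(startswith)/any(in) test) and slices the lines list; same fallback.
import Mathlib
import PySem

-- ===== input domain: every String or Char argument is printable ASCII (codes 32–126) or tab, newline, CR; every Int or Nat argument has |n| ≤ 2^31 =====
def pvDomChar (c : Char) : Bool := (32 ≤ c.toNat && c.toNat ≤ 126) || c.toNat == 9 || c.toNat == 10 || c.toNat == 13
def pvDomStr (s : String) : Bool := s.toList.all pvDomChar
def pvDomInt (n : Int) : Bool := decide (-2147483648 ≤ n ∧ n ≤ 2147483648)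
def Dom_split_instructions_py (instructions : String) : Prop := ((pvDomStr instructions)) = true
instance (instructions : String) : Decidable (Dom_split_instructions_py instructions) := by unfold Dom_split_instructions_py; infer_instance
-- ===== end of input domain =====

-- B replaces A's accumulator loop by a span decomposition (scan to the next boundary line, slice);
-- same result — an 'alternative' restructuring, no speed claim.

-- shared constants (identical literal lists in both Pythons)
def pvActionVerbs : List String :=
  ["create", "add", "make", "generate",
   "modify", "update", "change", "edit", "alter",
   "delete", "remove", "erase", "eliminate"]

def pvFileKeywords : List String :=
  ["file", "directory", "folder", "module", "class", "script"]

-- ===== PORT A =====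
-- A's nested verb/keyword loops with breaks: a search over pairs (any over any of a conjunction)
def pvIsNewA (line : String) : Bool :=
  let ll := PySem.Str.lower (PySem.Str.strip line)
  pvActionVerbs.any (fun v =>
    pvFileKeywords.any (fun k =>
      PySem.Str.startswith ll v && PySem.Str.isIn k ll))

-- A's loop body: flush current block on a boundary line, else extend it
def pvStepA (st : List String × List String) (line : String) : List String × List String :=
  if pvIsNewA line && !st.2.isEmpty then
    (st.1 ++ [PySem.Str.join "\n" st.2], [line])
  else
    (st.1, st.2 ++ [line])

def split_instructions_py (instructions : String) : List String :=
  -- split? is some for sep = "\n" ≠ ""; getD [] only totalizes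
  let lines := (PySem.Str.split? instructions "\n").getD []
  let st := lines.foldl pvStepA ([], [])
  let blocks := if !st.2.isEmpty then st.1 ++ [PySem.Str.join "\n" st.2] else st.1
  if blocks.length ≤ 1 ∧ 0 < PySem.Str.len (PySem.Str.strip instructions) then
    let paragraph_blocks := (PySem.Str.split? instructions "\n\n").getD []
    if 1 < paragraph_blocks.length then
      (paragraph_blocks.filter (fun b => PySem.Str.strip b != "")).map PySem.Str.strip
    else blocks
  else blocks

-- ===== PORT B =====
-- Source B's factored boundary test: any(startswith) and any(in)
def pvIsBoundary (line : String) : Bool :=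
  let ll := PySem.Str.lower (PySem.Str.strip line)
  pvActionVerbs.any (fun v => PySem.Str.startswith ll v) &&
  pvFileKeywords.any (fun k => PySem.Str.isIn k ll)

-- Source B's outer while loop over spans, as the structural recursion on the line list:
-- one block = first line plus the run of non-boundary lines after it
def pvBlocksOf : List String → List String
  | [] => []
  | l :: rest =>
    PySem.Str.join "\n" (l :: rest.takeWhile (fun s => !pvIsBoundary s)) ::
      pvBlocksOf (rest.dropWhile (fun s => !pvIsBoundary s))
termination_by l => l.length
decreasing_by
  have := List.length_dropWhile_le (fun s => !pvIsBoundary s) rest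
  simp; omega

def split_instructions_py_alt (instructions : String) : List String :=
  let lines := (PySem.Str.split? instructions "\n").getD []
  let blocks := pvBlocksOf lines
  if blocks.length ≤ 1 ∧ 0 < PySem.Str.len (PySem.Str.strip instructions) then
    let paragraph_blocks := (PySem.Str.split? instructions "\n\n").getD []
    if 1 < paragraph_blocks.length then
      (paragraph_blocks.filter (fun b => PySem.Str.strip b != "")).map PySem.Str.strip
    else blocks
  else blocks

-- ===== PRECONDITION & SPEC =====
def Spec_split_instructions_py (instructions : String) (out : List String) : Prop := out = split_instructions_py_alt instructions
instance (instructions : String) (out : List String) : Decidable (Spec_split_instructions_py instructions out) := by unfold Spec_split_instructions_py; infer_instance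

-- ===== CLAIM (what is proved, stated in full; the proofs are below) =====
def Claim_equal_split_instructions_py : Prop := ∀ (instructions : String), Dom_split_instructions_py instructions → Spec_split_instructions_py instructions (split_instructions_py instructions)

-- ===== LEMMAS AND PROOFS =====

-- a search over independent pairs factors into two searches
theorem pv_any_any_and {α β : Type} (l : List α) (m : List β) (p : α → Bool) (q : β → Bool) :
    l.any (fun v => m.any (fun k => p v && q k)) = (l.any p && m.any q) := by
  rw [Bool.eq_iff_iff]
  simp only [List.any_eq_true, Bool.and_eq_true]
  tauto

-- A's pair search equals B's factored test
theorem pvIsNewA_eq_isBoundary (line : String) : pvIsNewA line = pvIsBoundary line :=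
  pv_any_any_and pvActionVerbs pvFileKeywords _ _

theorem pvBlocksOf_nil : pvBlocksOf [] = [] := by rw [pvBlocksOf]

theorem pvBlocksOf_cons (l : String) (rest : List String) :
    pvBlocksOf (l :: rest) =
      PySem.Str.join "\n" (l :: rest.takeWhile (fun s => !pvIsBoundary s)) ::
        pvBlocksOf (rest.dropWhile (fun s => !pvIsBoundary s)) := by
  rw [pvBlocksOf]

-- running A's loop from a nonempty current block yields B's span blocks
theorem pvFold_spec (rest : List String) : ∀ (blocks cur : List String), cur ≠ [] →
    (rest.foldl pvStepA (blocks, cur)).2 ≠ [] ∧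
    (rest.foldl pvStepA (blocks, cur)).1 ++ [PySem.Str.join "\n" (rest.foldl pvStepA (blocks, cur)).2]
      = blocks ++ (PySem.Str.join "\n" (cur ++ rest.takeWhile (fun s => !pvIsBoundary s)) ::
          pvBlocksOf (rest.dropWhile (fun s => !pvIsBoundary s))) := by
  induction rest with
  | nil => intro blocks cur h; simp [pvBlocksOf_nil, h]
  | cons r rs ih =>
    intro blocks cur h
    have hne : cur.isEmpty = false := by simpa [List.isEmpty_iff] using h
    by_cases hb : pvIsBoundary r = true
    · have hstep : pvStepA (blocks, cur) r = (blocks ++ [PySem.Str.join "\n" cur], [r]) := by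
        simp [pvStepA, pvIsNewA_eq_isBoundary, hb, hne]
      obtain ⟨h1, h2⟩ := ih (blocks ++ [PySem.Str.join "\n" cur]) [r] (by simp)
      refine ⟨by simpa [hstep] using h1, ?_⟩
      rw [List.foldl_cons, hstep, h2]
      simp [hb, pvBlocksOf_cons]
    · have hb' : pvIsBoundary r = false := by simpa using hb
      have hstep : pvStepA (blocks, cur) r = (blocks, cur ++ [r]) := by
        simp [pvStepA, pvIsNewA_eq_isBoundary, hb']
      obtain ⟨h1, h2⟩ := ih blocks (cur ++ [r]) (by simp)
      refine ⟨by simpa [hstep] using h1, ?_⟩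
      rw [List.foldl_cons, hstep, h2]
      simp [hb']

-- A's whole loop + final flush computes B's pvBlocksOf, for any line list
theorem pvLoop_eq_blocksOf (lines : List String) :
    (if !(lines.foldl pvStepA ([], [])).2.isEmpty then
       (lines.foldl pvStepA ([], [])).1 ++ [PySem.Str.join "\n" (lines.foldl pvStepA ([], [])).2]
     else (lines.foldl pvStepA ([], [])).1)
      = pvBlocksOf lines := by
  cases lines with
  | nil => simp [pvBlocksOf_nil]
  | cons l ls =>
    have hstep : pvStepA ([], []) l = ([], [l]) := by simp [pvStepA]
    obtain ⟨h1, h2⟩ := pvFold_spec ls [] [l] (by simp)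
    have hne : (ls.foldl pvStepA ([], [l])).2.isEmpty = false := by
      simpa [List.isEmpty_iff] using h1
    rw [List.foldl_cons, hstep, hne]
    simpa [pvBlocksOf_cons] using h2

-- ===== VERDICT (by name: the statement is the Claim_ definition above) =====
theorem split_instructions_py_spec : Claim_equal_split_instructions_py := by
  intro instructions _
  unfold Spec_split_instructions_py
  simp only [split_instructions_py, split_instructions_py_alt, pvLoop_eq_blocksOf]
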